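-- pv_equiv track=rewrite | github.com/palmaus/threat-aware-swarm | scripts/eval/summarize_run.py | _select_eval_row
-- ===== SOURCE A (Python) =====
-- from typing import Any
--
-- def _select_eval_row(eval_rows: list[dict[str, Any]]) -> dict[str, Any] | None:
--     if not eval_rows:
--         return None
--     for name in ("best_by_finished", "final"):
--         for row in eval_rows:
--             if row.get("model_name") == name:
--                 return row
--     return eval_rows[0]
-- ===== SOURCE B (Python) =====
-- def _select_eval_row(eval_rows):
--     if not eval_rows:
--         return None
--     first_seen = {}
--     for row in eval_rows:
--         k = row.get("model_name")
--         if k not in first_seen: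
--             first_seen[k] = row
--     for name in ("best_by_finished", "final"):
--         if name in first_seen:
--             return first_seen[name]
--     return eval_rows[0]
-- ===== Notes on version B (the rewrite author's own statement) =====
-- stated objective: alternative
-- what changed: Replaces the per-priority-name rescans of eval_rows with a single pass that builds a first-occurrence index keyed by model_name, followed by flat dict lookups over the priority tuple.
import Mathlib
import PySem

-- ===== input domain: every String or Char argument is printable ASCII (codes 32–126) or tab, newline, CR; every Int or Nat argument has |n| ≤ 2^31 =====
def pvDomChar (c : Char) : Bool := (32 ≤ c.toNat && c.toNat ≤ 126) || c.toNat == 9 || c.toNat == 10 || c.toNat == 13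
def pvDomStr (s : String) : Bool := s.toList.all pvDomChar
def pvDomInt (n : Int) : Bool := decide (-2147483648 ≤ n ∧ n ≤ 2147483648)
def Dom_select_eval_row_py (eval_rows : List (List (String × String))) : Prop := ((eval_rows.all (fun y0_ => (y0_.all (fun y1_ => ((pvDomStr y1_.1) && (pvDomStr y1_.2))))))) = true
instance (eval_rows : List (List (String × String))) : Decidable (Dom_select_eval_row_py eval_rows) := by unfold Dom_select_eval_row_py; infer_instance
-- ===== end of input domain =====

-- B replaces A's per-priority-name rescans of eval_rows with one index-building pass
-- (first row per model_name) followed by flat priority lookups (objective: alternative).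

-- ===== PORT A =====
-- inner loop: 'for row in eval_rows: if row.get("model_name") == name: return row'
def pvAFindRow (name : String) : List (List (String × String)) → Option (List (String × String))
  | [] => none
  | r :: rs =>
    if (PySem.Dict.mk r).get? "model_name" = some name then some r else pvAFindRow name rs

-- outer loop: 'for name in ("best_by_finished", "final"): …'
def pvALoopNames : List String → List (List (String × String)) → Option (List (String × String))
  | [], _ => none
  | n :: ns, rows =>
    match pvAFindRow n rows with
    | some r => some r
    | none => pvALoopNames ns rows

def select_eval_row_py (eval_rows : List (List (String × String))) : Option (List (String × String)) :=
  if eval_rows = [] then none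
  else
    match pvALoopNames ["best_by_finished", "final"] eval_rows with
    | some r => some r
    | none => PySem.List.pyGet? eval_rows 0

-- ===== PORT B =====
-- one pass: first_seen[k] = first row with model_name k (set only if absent)
def pvBBuild : List (List (String × String)) →
    PySem.Dict (Option String) (List (String × String)) →
    PySem.Dict (Option String) (List (String × String))
  | [], acc => acc
  | r :: rs, acc =>
    let k := (PySem.Dict.mk r).get? "model_name"
    pvBBuild rs (if acc.contains k then acc else acc.insert k r)

-- flat lookups over the priority tuple
def pvBLookup (d : PySem.Dict (Option String) (List (String × String))) :
    List String → Option (List (String × String))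
  | [] => none
  | n :: ns =>
    match d.get? (some n) with
    | some r => some r
    | none => pvBLookup d ns

def select_eval_row_py_alt (eval_rows : List (List (String × String))) : Option (List (String × String)) :=
  match eval_rows with
  | [] => none
  | first :: _ =>
    let d := pvBBuild eval_rows PySem.Dict.empty
    match pvBLookup d ["best_by_finished", "final"] with
    | some r => some r
    | none => some first

-- ===== PRECONDITION & SPEC =====
def Spec_select_eval_row_py (eval_rows : List (List (String × String))) (out : Option (List (String × String))) : Prop := out = select_eval_row_py_alt eval_rows
instance (eval_rows : List (List (String × String))) (out : Option (List (String × String))) : Decidable (Spec_select_eval_row_py eval_rows out) := by unfold Spec_select_eval_row_py; infer_instance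

-- ===== CLAIM (what is proved, stated in full; the proofs are below) =====
def Claim_equal_select_eval_row_py : Prop := ∀ (eval_rows : List (List (String × String))), Dom_select_eval_row_py eval_rows → Spec_select_eval_row_py eval_rows (select_eval_row_py eval_rows)

-- ===== LEMMAS AND PROOFS =====

-- lookup in the built index = first row whose model_name is the key
theorem pvBBuild_get? (rows : List (List (String × String)))
    (acc : PySem.Dict (Option String) (List (String × String))) (name : String) :
    (pvBBuild rows acc).get? (some name) =
      ((acc.get? (some name)).or (pvAFindRow name rows)) := by
  induction rows generalizing acc with
  | nil => simp [pvBBuild, pvAFindRow]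
  | cons r rs ih =>
    simp only [pvBBuild, pvAFindRow]
    rw [ih]
    by_cases hk : (PySem.Dict.mk r).get? "model_name" = some name
    · rw [hk, if_pos rfl]
      by_cases hc : acc.contains (some name) = true
      · rw [if_pos hc]
        rcases hv : acc.get? (some name) with _ | v
        · have h0 := (PySem.Dict.get?_eq_none_iff_contains acc (some name)).mp hv
          rw [h0] at hc; simp at hc
        · simp
      · rw [if_neg hc, PySem.Dict.get?_insert_self,
          (PySem.Dict.get?_eq_none_iff_contains acc (some name)).mpr (by simpa using hc)]
        simp
    · rw [if_neg hk]
      by_cases hc : acc.contains ((PySem.Dict.mk r).get? "model_name") = true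
      · rw [if_pos hc]
      · rw [if_neg hc, PySem.Dict.get?_insert_of_ne acc r (Ne.symm hk)]

theorem pvBLookup_eq (rows : List (List (String × String))) (ns : List String) :
    pvBLookup (pvBBuild rows PySem.Dict.empty) ns = pvALoopNames ns rows := by
  induction ns with
  | nil => rfl
  | cons n ns ih =>
    simp only [pvBLookup, pvALoopNames, ih, pvBBuild_get?, PySem.Dict.get?_empty,
      Option.none_or]

theorem select_eval_row_py_eq (eval_rows : List (List (String × String))) :
    select_eval_row_py eval_rows = select_eval_row_py_alt eval_rows := by
  cases eval_rows with
  | nil => rfl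
  | cons first rest =>
    simp only [select_eval_row_py, select_eval_row_py_alt, if_neg (List.cons_ne_nil first rest),
      pvBLookup_eq]
    cases pvALoopNames ["best_by_finished", "final"] (first :: rest) with
    | some r => rfl
    | none => simp [PySem.List.pyGet?, PySem.List.pyIdx?]

-- ===== VERDICT (by name: the statement is the Claim_ definition above) =====
theorem select_eval_row_py_spec : Claim_equal_select_eval_row_py := by
  intro eval_rows _
  exact select_eval_row_py_eq eval_rows
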